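-- pv_equiv track=rewrite | github.com/Sangeetha8034/python-mini-challenges | code.py | a_scramble
-- ===== SOURCE A (Python) =====
-- def a_scramble(str_1, str_2):
--     str_1=str_1.strip().lower()
--     str_2=str_2.strip().lower()
--     dic={}
--     for i in str_2:
--         if i not in dic:
--             dic[i]=1
--         else:
--             dic[i]+=1
--     for i in str_1:
--         if i in dic:
--             dic[i]-=1
--     for i in dic:
--         if dic[i]>0:
--             return False
--     return True
-- ===== SOURCE B (Python) =====
-- def a_scramble(str_1, str_2):
--     str_1 = str_1.strip().lower()
--     str_2 = str_2.strip().lower()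
--     return all(str_1.count(ch) >= str_2.count(ch) for ch in set(str_2))
-- ===== Notes on version B (the rewrite author's own statement) =====
-- stated objective: idiomatic
-- what changed: Replaces the count-dictionary built in one tabulating pass and decremented in a second pass by a single all() over the distinct required characters, rescanning both strings with str.count per character.
import Mathlib
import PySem

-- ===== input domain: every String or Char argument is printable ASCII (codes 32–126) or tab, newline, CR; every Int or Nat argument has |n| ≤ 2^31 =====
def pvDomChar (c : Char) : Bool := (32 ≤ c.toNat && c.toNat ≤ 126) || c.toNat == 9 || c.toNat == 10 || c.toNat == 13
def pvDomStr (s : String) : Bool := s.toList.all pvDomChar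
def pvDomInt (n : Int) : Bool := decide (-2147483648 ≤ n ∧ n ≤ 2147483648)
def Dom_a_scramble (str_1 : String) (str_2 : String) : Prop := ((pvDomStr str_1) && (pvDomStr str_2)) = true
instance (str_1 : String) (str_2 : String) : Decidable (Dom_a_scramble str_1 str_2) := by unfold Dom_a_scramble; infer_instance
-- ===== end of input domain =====

-- B replaces A's count dictionary (build, decrement, scan) by one all() over the
-- distinct required characters, rescanning both strings with count per character (idiomatic, not faster).

-- ===== PORT A =====
def a_scramble (str_1 : String) (str_2 : String) : Bool :=
  let s1 := PySem.Str.lower (PySem.Str.strip str_1)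
  let s2 := PySem.Str.lower (PySem.Str.strip str_2)
  let dic : PySem.Dict Char Int :=
    s2.toList.foldl (fun d i =>
      if !d.contains i then d.insert i 1
      else d.insert i (d.getD i 0 + 1)) PySem.Dict.empty
  let dic :=
    s1.toList.foldl (fun d i =>
      if d.contains i then d.insert i (d.getD i 0 - 1) else d) dic
  -- 'for i in dic: if dic[i] > 0: return False' then 'return True'
  dic.keys.all (fun i => !(decide (dic.getD i 0 > 0)))

-- ===== PORT B =====
def a_scramble_alt (str_1 : String) (str_2 : String) : Bool :=
  let s1 := PySem.Str.lower (PySem.Str.strip str_1)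
  let s2 := PySem.Str.lower (PySem.Str.strip str_2)
  (PySem.Set.ofList s2.toList).all
    (fun ch => decide (s1.toList.count ch ≥ s2.toList.count ch))

-- ===== PRECONDITION & SPEC =====
def Spec_a_scramble (str_1 : String) (str_2 : String) (out : Bool) : Prop := out = a_scramble_alt str_1 str_2
instance (str_1 : String) (str_2 : String) (out : Bool) : Decidable (Spec_a_scramble str_1 str_2 out) := by unfold Spec_a_scramble; infer_instance

-- ===== CLAIM (what is proved, stated in full; the proofs are below) =====
def Claim_equal_a_scramble : Prop := ∀ (str_1 : String) (str_2 : String), Dom_a_scramble str_1 str_2 → Spec_a_scramble str_1 str_2 (a_scramble str_1 str_2)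

-- ===== LEMMAS AND PROOFS =====

-- A's first loop ('if i not in dic: dic[i]=1 else: dic[i]+=1') is Counter(l2).
theorem pv_first_loop_eq_counter (l2 : List Char) :
    l2.foldl (fun d i =>
      if !d.contains i then d.insert i 1
      else d.insert i (d.getD i 0 + 1)) PySem.Dict.empty = PySem.Dict.counter l2 := by
  rw [← PySem.Dict.foldl_insert_getD_add_one_eq_counter]
  congr 1
  funext d i
  by_cases h : d.contains i = true
  · simp [h]
  · have h0 : d.getD i 0 = 0 :=
      PySem.Dict.getD_of_not_contains d 0 (Bool.eq_false_iff.mpr h)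
    simp [h, h0]

-- every element of l.all agrees
theorem pv_all_congr {l : List Char} {f g : Char → Bool}
    (h : ∀ v ∈ l, f v = g v) : l.all f = l.all g := by
  induction l with
  | nil => rfl
  | cons a t ih => simp_all [List.all_cons]

-- A's second loop keeps the key set and subtracts the count of each present key.
theorem pv_dec_loop (l1 : List Char) (d : PySem.Dict Char Int) (v : Char) :
    ((l1.foldl (fun d i =>
        if d.contains i then d.insert i (d.getD i 0 - 1) else d) d).contains v = d.contains v)
    ∧ ((l1.foldl (fun d i =>
        if d.contains i then d.insert i (d.getD i 0 - 1) else d) d).keys = d.keys)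
    ∧ ((l1.foldl (fun d i =>
        if d.contains i then d.insert i (d.getD i 0 - 1) else d) d).getD v 0 =
        d.getD v 0 - (if d.contains v then (l1.count v : Int) else 0)) := by
  induction l1 generalizing d with
  | nil => simp
  | cons a t ih =>
    simp only [List.foldl_cons]
    by_cases ha : d.contains a = true
    · rw [if_pos ha]
      obtain ⟨hc, hk, hg⟩ := ih (d.insert a (d.getD a 0 - 1))
      refine ⟨?_, ?_, ?_⟩
      · rw [hc, PySem.Dict.contains_insert]
        by_cases hva : v = a
        · simp [hva, ha]
        · simp [(by simpa using hva : (v == a) = false)]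
      · rw [hk, PySem.Dict.keys_insert_of_contains d _ ha]
      · rw [hg, PySem.Dict.getD_insert, PySem.Dict.contains_insert]
        by_cases hva : v = a
        · subst hva
          simp [ha]
          ring
        · have hav : ¬ a = v := fun hh => hva hh.symm
          simp [hva, hav, (by simpa using hva : (v == a) = false)]
    · rw [if_neg ha]
      obtain ⟨hc, hk, hg⟩ := ih d
      refine ⟨hc, hk, ?_⟩
      rw [hg]
      by_cases hva : v = a
      · subst hva; simp [ha]
      · by_cases hv : d.contains v = true
        · have hav : ¬ a = v := fun hh => hva hh.symm
          simp [hv, hav]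
        · simp [hv]

-- ===== VERDICT (by name: the statement is the Claim_ definition above) =====
theorem a_scramble_spec : Claim_equal_a_scramble := by
  intro str_1 str_2 _
  unfold Spec_a_scramble a_scramble a_scramble_alt
  simp only
  rw [pv_first_loop_eq_counter]
  set l1 := (PySem.Str.lower (PySem.Str.strip str_1)).toList with hl1
  set l2 := (PySem.Str.lower (PySem.Str.strip str_2)).toList with hl2
  have hkeys := (pv_dec_loop l1 (PySem.Dict.counter l2) 'a').2.1
  rw [hkeys, PySem.Dict.keys_counter]
  apply pv_all_congr
  intro v hv
  have hcont : (PySem.Dict.counter l2).contains v = true := by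
    rw [PySem.Dict.contains_counter]
    simpa using ((PySem.Set.mem_ofList l2 v).mp hv)
  have hg := (pv_dec_loop l1 (PySem.Dict.counter l2) v).2.2
  rw [hg, PySem.Dict.getD_counter, hcont, if_pos rfl, Bool.eq_iff_iff]
  simp only [Bool.not_eq_true', decide_eq_false_iff_not, decide_eq_true_eq,
    gt_iff_lt, not_lt, ge_iff_le]
  omega
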